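-- pv_equiv track=rewrite | github.com/k8shiro/programming_contest_practice | AtCoder/abc221_c.py | assign_to_two_boxes
-- ===== SOURCE A (Python) =====
-- from itertools import product
--
-- def assign_to_two_boxes(arr):
--     n = len(arr)
--     result = []
--
--     # 各要素に「0（箱A）」または「1（箱B）」の割り当て方を全通り列挙
--     for bits in product((0, 1), repeat=n):
--         box1 = [arr[i] for i in range(n) if bits[i] == 0]
--         box2 = [arr[i] for i in range(n) if bits[i] == 1]
--         result.append((box1, box2))
--
--     return result
-- ===== SOURCE B (Python) =====
-- def assign_to_two_boxes(arr):
--     result = []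
--
--     def go(i, box1, box2):
--         if i == len(arr):
--             result.append((list(box1), list(box2)))
--             return
--         box1.append(arr[i])
--         go(i + 1, box1, box2)
--         box1.pop()
--         box2.append(arr[i])
--         go(i + 1, box1, box2)
--         box2.pop()
--
--     go(0, [], [])
--     return result
-- ===== Notes on version B (the rewrite author's own statement) =====
-- stated objective: alternative
-- what changed: Replaced the iterate-over-all-bit-tuples-then-filter enumeration (itertools product over n binary choices with two index-filter comprehensions per tuple) by a backtracking recursion over the array that carries the two boxes as mutable accumulators, emitting a partition at each leaf.
import Mathlib
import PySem

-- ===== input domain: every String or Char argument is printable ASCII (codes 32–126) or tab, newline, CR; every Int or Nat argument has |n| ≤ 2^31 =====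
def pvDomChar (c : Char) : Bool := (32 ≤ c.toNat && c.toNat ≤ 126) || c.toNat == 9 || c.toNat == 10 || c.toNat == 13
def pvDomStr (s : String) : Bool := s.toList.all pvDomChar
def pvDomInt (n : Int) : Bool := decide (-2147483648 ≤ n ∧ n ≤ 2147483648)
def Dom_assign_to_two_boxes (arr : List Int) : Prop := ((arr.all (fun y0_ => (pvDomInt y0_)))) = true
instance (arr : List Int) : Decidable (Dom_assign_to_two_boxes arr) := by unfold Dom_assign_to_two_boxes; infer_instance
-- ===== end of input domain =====

-- B replaces A's enumerate-all-bit-tuples-then-filter loop by a backtracking recursion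
-- carrying the two boxes as accumulators; same output, same order (alternative decomposition).

-- ===== PORT A =====
-- itertools.product((0,1), repeat=n): all length-n tuples over {0,1}, last position fastest
def pvProduct01 : Nat → List (List Nat)
  | 0 => [[]]
  | n + 1 => ([0, 1] : List Nat).flatMap (fun b => (pvProduct01 n).map (fun t => b :: t))

-- [arr[i] for i in range(n) if bits[i] == 0]  (arr and bits have equal length n)
def pvBox0 (arr : List Int) (bits : List Nat) : List Int :=
  ((arr.zip bits).filter (fun p => p.2 == 0)).map Prod.fst

-- [arr[i] for i in range(n) if bits[i] == 1]
def pvBox1 (arr : List Int) (bits : List Nat) : List Int :=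
  ((arr.zip bits).filter (fun p => p.2 == 1)).map Prod.fst

def assign_to_two_boxes (arr : List Int) : List (List Int × List Int) :=
  (pvProduct01 arr.length).foldl
    (fun result bits => result ++ [(pvBox0 arr bits, pvBox1 arr bits)]) []

-- ===== PORT B =====
-- go: at each element, first put it in box1 and recurse, then in box2 and recurse;
-- at the end of the array emit the accumulated partition.
def pvGo : List Int → List Int → List Int → List (List Int × List Int)
  | [], box1, box2 => [(box1, box2)]
  | x :: rest, box1, box2 =>
      pvGo rest (box1 ++ [x]) box2 ++ pvGo rest box1 (box2 ++ [x])

def assign_to_two_boxes_alt (arr : List Int) : List (List Int × List Int) :=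
  pvGo arr [] []

-- ===== PRECONDITION & SPEC =====
def Spec_assign_to_two_boxes (arr : List Int) (out : List (List Int × List Int)) : Prop := out = assign_to_two_boxes_alt arr
instance (arr : List Int) (out : List (List Int × List Int)) : Decidable (Spec_assign_to_two_boxes arr out) := by unfold Spec_assign_to_two_boxes; infer_instance

-- ===== CLAIM (what is proved, stated in full; the proofs are below) =====
def Claim_equal_assign_to_two_boxes : Prop := ∀ (arr : List Int), Dom_assign_to_two_boxes arr → Spec_assign_to_two_boxes arr (assign_to_two_boxes arr)

-- ===== LEMMAS AND PROOFS =====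
theorem pv_foldl_append {α β : Type} (f : α → β) (l : List α) (acc : List β) :
    l.foldl (fun r x => r ++ [f x]) acc = acc ++ l.map f := by
  induction l generalizing acc with
  | nil => simp
  | cons x t ih => simp [List.foldl, ih]

theorem pvBox0_cons (x : Int) (rest : List Int) (b : Nat) (bits : List Nat) :
    pvBox0 (x :: rest) (b :: bits) =
      if b == 0 then x :: pvBox0 rest bits else pvBox0 rest bits := by
  by_cases h : b = 0 <;> simp [pvBox0, h]

theorem pvBox1_cons (x : Int) (rest : List Int) (b : Nat) (bits : List Nat) :
    pvBox1 (x :: rest) (b :: bits) =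
      if b == 1 then x :: pvBox1 rest bits else pvBox1 rest bits := by
  by_cases h : b = 1 <;> simp [pvBox1, h]

theorem pvGo_eq_map (arr : List Int) : ∀ (b1 b2 : List Int),
    pvGo arr b1 b2 =
      (pvProduct01 arr.length).map
        (fun bits => (b1 ++ pvBox0 arr bits, b2 ++ pvBox1 arr bits)) := by
  induction arr with
  | nil =>
      intro b1 b2
      simp [pvGo, pvProduct01, pvBox0, pvBox1]
  | cons x rest ih =>
      intro b1 b2
      simp only [pvGo, ih, List.length_cons, pvProduct01, List.flatMap_cons,
        List.flatMap_nil, List.append_nil, List.map_append, List.map_map]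
      congr 1 <;>
        · apply List.map_congr_left
          intro bits _
          simp [pvBox0_cons, pvBox1_cons, List.append_assoc]

theorem assign_to_two_boxes_eq (arr : List Int) :
    assign_to_two_boxes arr = assign_to_two_boxes_alt arr := by
  rw [assign_to_two_boxes, pv_foldl_append, assign_to_two_boxes_alt, pvGo_eq_map]
  simp

-- ===== VERDICT (by name: the statement is the Claim_ definition above) =====
theorem assign_to_two_boxes_spec : Claim_equal_assign_to_two_boxes := by
  intro arr _
  unfold Spec_assign_to_two_boxes
  exact assign_to_two_boxes_eq arr
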